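-- pv_equiv track=rewrite | github.com/iosifnicolae2/hack-for-facts-eb-client | scripts/insert_translations.py | update_po_file
-- ===== SOURCE A (Python) =====
-- from typing import Dict, List, Tuple
--
-- def update_po_file(po_lines: List[str], translations: Dict[str, str]) -> Tuple[List[str], int]:
--     """
--     Update PO file lines with translations.
--
--     Args:
--         po_lines: List of lines from the PO file
--         translations: Dictionary mapping msgid to msgstr
--
--     Returns:
--         Tuple of (updated lines, count of updates)
--     """
--     updated_lines = []
--     updates_count = 0
--     i = 0
--
--     while i < len(po_lines):
--         line = po_lines[i]
--         updated_lines.append(line)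
--
--         # Check if this is a msgid line
--         if line.strip().startswith('msgid '):
--             msgid_content = line.strip()[6:].strip()
--
--             # Look ahead for the msgstr line
--             if i + 1 < len(po_lines):
--                 next_line = po_lines[i + 1]
--
--                 # Check if next line is an empty msgstr
--                 if next_line.strip() == 'msgstr ""' or next_line.strip() == 'msgstr ""':
--                     # Check if we have a translation for this msgid
--                     if msgid_content in translations:
--                         # Replace the empty msgstr with the translation
--                         updated_lines.append(f'msgstr {translations[msgid_content]}\n')
--                         updates_count += 1
--                         i += 2  # Skip the original msgstr line
--                         continue
--
--         i += 1
--
--     return updated_lines, updates_count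
-- ===== SOURCE B (Python) =====
-- def update_po_file(po_lines, translations):
--     """Single forward pass carrying the pending msgid instead of index lookahead."""
--     updated_lines = []
--     updates_count = 0
--     pending = None
--     for line in po_lines:
--         if pending is not None and line.strip() == 'msgstr ""' and pending in translations:
--             updated_lines.append(f'msgstr {translations[pending]}\n')
--             updates_count += 1
--             pending = None
--             continue
--         updated_lines.append(line)
--         s = line.strip()
--         pending = s[6:].strip() if s.startswith('msgid ') else None
--     return updated_lines, updates_count
-- ===== Notes on version B (the rewrite author's own statement) =====
-- stated objective: simpler
-- what changed: Replaced A's index-based while loop with lookahead (po_lines[i+1]) and i+=2 skip by a single forward for-loop that carries the pending msgid as state.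
import Mathlib
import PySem

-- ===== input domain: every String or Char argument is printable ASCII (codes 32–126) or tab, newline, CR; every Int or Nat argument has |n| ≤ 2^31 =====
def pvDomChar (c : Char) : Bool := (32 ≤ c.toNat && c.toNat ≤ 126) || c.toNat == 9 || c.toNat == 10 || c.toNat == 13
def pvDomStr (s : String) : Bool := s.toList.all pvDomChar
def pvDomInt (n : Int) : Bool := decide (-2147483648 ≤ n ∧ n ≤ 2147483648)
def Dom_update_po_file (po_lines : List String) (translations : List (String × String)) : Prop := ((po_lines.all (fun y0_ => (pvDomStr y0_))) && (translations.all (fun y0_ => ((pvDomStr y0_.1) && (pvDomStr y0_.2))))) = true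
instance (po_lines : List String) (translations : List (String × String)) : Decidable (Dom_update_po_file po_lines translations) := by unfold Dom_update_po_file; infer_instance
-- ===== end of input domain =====

-- B replaces A's index-based while loop with lookahead/skip by a single forward
-- for-loop carrying the pending msgid as state (objective: simpler decomposition).

-- ===== PORT A =====
-- line.strip()[6:].strip()
def pvMsgid (line : String) : String :=
  PySem.Str.strip (PySem.Str.slice (PySem.Str.strip line) (some 6) none)

-- the while loop of A, over the remaining suffix of po_lines (i / i+=1 / i+=2
-- become recursion on the suffix, same accumulators updated_lines / updates_count)
-- the while loop of A, over the remaining suffix of po_lines (i / i+=1 / i+=2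
-- become recursion on the suffix, same accumulators updated_lines / updates_count;
-- A's "if i + 1 < len(po_lines)" lookahead is the [line] vs line :: next_line :: _ split)
def pvLoopA (translations : List (String × String)) :
    List String → List String → Int → List String × Int
  | [], acc, cnt => (acc, cnt)
  | [line], acc, cnt => (acc ++ [line], cnt)   -- last line: no lookahead possible, loop ends
  | line :: next_line :: rest2, acc, cnt =>
    let acc := acc ++ [line]
    if PySem.Str.startswith (PySem.Str.strip line) "msgid " then
      let msgid_content := pvMsgid line
      if PySem.Str.strip next_line == "msgstr \"\"" then
        if (translations.lookup msgid_content).isSome then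
          pvLoopA translations rest2
            (acc ++ ["msgstr " ++ (translations.lookup msgid_content).getD "" ++ "\n"])
            (cnt + 1)
        else pvLoopA translations (next_line :: rest2) acc cnt
      else pvLoopA translations (next_line :: rest2) acc cnt
    else pvLoopA translations (next_line :: rest2) acc cnt

def update_po_file (po_lines : List String) (translations : List (String × String)) : List String × Int :=
  pvLoopA translations po_lines [] 0

-- ===== PORT B =====
-- one step of B's for-loop: state = (pending msgid, updated_lines, updates_count)
def pvStepB (translations : List (String × String))
    (st : Option String × List String × Int) (line : String) :
    Option String × List String × Int :=
  match st with
  | (pending, acc, cnt) =>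
    let hit := match pending with
      | some m => PySem.Str.strip line == "msgstr \"\"" && (translations.lookup m).isSome
      | none => false
    if hit then
      match pending with
      | some m => (none, acc ++ ["msgstr " ++ (translations.lookup m).getD "" ++ "\n"], cnt + 1)
      | none => (none, acc, cnt)   -- unreachable: hit forces pending = some m
    else
      let s := PySem.Str.strip line
      ((if PySem.Str.startswith s "msgid " then
          some (PySem.Str.strip (PySem.Str.slice s (some 6) none)) else none),
       acc ++ [line], cnt)

def update_po_file_alt (po_lines : List String) (translations : List (String × String)) : List String × Int :=
  match po_lines.foldl (pvStepB translations) (none, [], 0) with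
  | (_, acc, cnt) => (acc, cnt)

-- ===== PRECONDITION & SPEC =====
def Spec_update_po_file (po_lines : List String) (translations : List (String × String)) (out : List String × Int) : Prop := out = update_po_file_alt po_lines translations
instance (po_lines : List String) (translations : List (String × String)) (out : List String × Int) : Decidable (Spec_update_po_file po_lines translations out) := by unfold Spec_update_po_file; infer_instance

-- ===== CLAIM (what is proved, stated in full; the proofs are below) =====
def Claim_equal_update_po_file : Prop := ∀ (po_lines : List String) (translations : List (String × String)), Dom_update_po_file po_lines translations → Spec_update_po_file po_lines translations (update_po_file po_lines translations)

-- ===== LEMMAS AND PROOFS =====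

-- pvStepB unfolded on a pending-free state
lemma pvStepB_none (tr : List (String × String)) (acc : List String) (cnt : Int) (line : String) :
    pvStepB tr (none, acc, cnt) line =
      ((if PySem.Str.startswith (PySem.Str.strip line) "msgid " then some (pvMsgid line) else none),
       acc ++ [line], cnt) := rfl

-- pvStepB unfolded on a state carrying a pending msgid
lemma pvStepB_some (tr : List (String × String)) (m : String) (acc : List String) (cnt : Int) (line : String) :
    pvStepB tr (some m, acc, cnt) line =
      if PySem.Str.strip line == "msgstr \"\"" && (tr.lookup m).isSome then
        (none, acc ++ ["msgstr " ++ (tr.lookup m).getD "" ++ "\n"], cnt + 1)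
      else
        ((if PySem.Str.startswith (PySem.Str.strip line) "msgid " then some (pvMsgid line) else none),
         acc ++ [line], cnt) := rfl

lemma pvLoopA_eq_foldB (tr : List (String × String)) :
    ∀ (n : Nat) (l : List String), l.length ≤ n → ∀ (acc : List String) (cnt : Int),
      pvLoopA tr l acc cnt =
        (match l.foldl (pvStepB tr) (none, acc, cnt) with
         | (_, a, c) => (a, c)) := by
  intro n
  induction n with
  | zero =>
    intro l hl acc cnt
    have : l = [] := List.eq_nil_of_length_eq_zero (Nat.le_zero.mp hl)
    subst this; rfl
  | succ n ih =>
    intro l hl acc cnt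
    match l with
    | [] => rfl
    | [line] => rfl
    | line :: next :: rest2 =>
      simp only [List.foldl, pvStepB_none]
      by_cases hm : PySem.Str.startswith (PySem.Str.strip line) "msgid " = true
      · rw [if_pos hm]
        by_cases h1 : (PySem.Str.strip next == "msgstr \"\"") = true
        · by_cases h2 : (tr.lookup (pvMsgid line)).isSome = true
          · rw [pvStepB_some, if_pos (by rw [h1, h2]; rfl)]
            show pvLoopA tr (line :: next :: rest2) acc cnt = _
            simp only [pvLoopA]
            rw [if_pos hm, if_pos h1, if_pos h2]
            exact ih rest2 (by simp at hl; omega)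
              ((acc ++ [line]) ++ ["msgstr " ++ (tr.lookup (pvMsgid line)).getD "" ++ "\n"])
              (cnt + 1)
          · rw [pvStepB_some, if_neg (by rw [h1]; simpa using h2), ← pvStepB_none tr]
            show pvLoopA tr (line :: next :: rest2) acc cnt = _
            simp only [pvLoopA]
            rw [if_pos hm, if_pos h1, if_neg h2]
            have := ih (next :: rest2) (by simp at hl ⊢; omega) (acc ++ [line]) cnt
            simpa [List.foldl, pvStepB_none] using this
        · rw [pvStepB_some, if_neg (by rw [Bool.not_eq_true] at h1; simp [h1]), ← pvStepB_none tr]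
          show pvLoopA tr (line :: next :: rest2) acc cnt = _
          simp only [pvLoopA]
          rw [if_pos hm, if_neg h1]
          have := ih (next :: rest2) (by simp at hl ⊢; omega) (acc ++ [line]) cnt
          simpa [List.foldl, pvStepB_none] using this
      · rw [if_neg hm]
        show pvLoopA tr (line :: next :: rest2) acc cnt = _
        rw [pvLoopA]
        rw [if_neg hm]
        have := ih (next :: rest2) (by simp at hl ⊢; omega) (acc ++ [line]) cnt
        simpa [List.foldl, pvStepB_none] using this

-- ===== VERDICT (by name: the statement is the Claim_ definition above) =====
theorem update_po_file_spec : Claim_equal_update_po_file := by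
  intro po_lines translations _
  unfold Spec_update_po_file update_po_file update_po_file_alt
  exact pvLoopA_eq_foldB translations po_lines.length po_lines (le_refl _) [] 0
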